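-- pv_equiv track=rewrite | github.com/BenjaminSuger/Advent_Of_Code | 2015/day03/part2.py | count
-- ===== SOURCE A (Python) =====
-- def count(string : str) -> int:
--     x = 0
--     y = 0
--     x_robot = 0
--     y_robot = 0
--     i = 0
--     houses = {(x,y)}
--
--     while i < len(string):
--         match(string[i]):
--             case "^":
--                 if (i % 2 == 0):
--                     y +=1
--                 else:
--                     y_robot +=1
--             case ">":
--                 if (i % 2 == 0):
--                     x +=1
--                 else:
--                     x_robot +=1
--             case "<":
--                 if (i % 2 == 0):
--                     x -=1
--                 else:
--                     x_robot -=1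
--             case "v":
--                 if (i % 2 == 0):
--                     y -=1
--                 else:
--                     y_robot -=1
--         houses.add((x,y))
--         houses.add((x_robot,y_robot))
--         i += 1
--     return (len(houses))
-- ===== SOURCE B (Python) =====
-- def _walk(s: str) -> set:
--     """Positions visited by one mover walking s from the origin (origin included)."""
--     x = y = 0
--     seen = {(0, 0)}
--     for c in s:
--         if c == '^':
--             y += 1
--         elif c == 'v':
--             y -= 1
--         elif c == '>':
--             x += 1
--         elif c == '<':
--             x -= 1
--         seen.add((x, y))
--     return seen
--
-- def count(string: str) -> int:
--     return len(_walk(string[::2]) | _walk(string[1::2]))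
-- ===== Notes on version B (the rewrite author's own statement) =====
-- stated objective: alternative
-- what changed: Replaces A's single interleaved loop with a parity test over four coordinates by slicing the input into the two movers' streams (string[::2], string[1::2]), simulating each mover independently with one shared walk helper, and returning the size of the union of the two visited-position sets.
import Mathlib
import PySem

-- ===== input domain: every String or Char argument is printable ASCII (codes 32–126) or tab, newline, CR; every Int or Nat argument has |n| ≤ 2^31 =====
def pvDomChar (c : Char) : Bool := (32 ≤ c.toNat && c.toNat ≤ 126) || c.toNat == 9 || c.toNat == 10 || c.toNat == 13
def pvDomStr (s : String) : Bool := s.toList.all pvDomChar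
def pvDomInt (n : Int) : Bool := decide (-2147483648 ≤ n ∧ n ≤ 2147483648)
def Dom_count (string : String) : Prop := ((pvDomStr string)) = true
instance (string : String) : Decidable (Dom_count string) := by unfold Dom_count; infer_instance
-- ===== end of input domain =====

-- B splits the input into the two movers' streams (string[::2] / string[1::2]), simulates each
-- independently and returns the size of the union of the two visited sets, replacing A's
-- interleaved parity-checked loop over four coordinates (objective: alternative decomposition).

-- ===== PORT A =====
-- one iteration of A's while-loop: ic = (i, string[i]); state = (x, y, x_robot, y_robot, houses)
def pvAStep (st : Int × Int × Int × Int × PySem.Set (Int × Int)) (ic : Int × Char) :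
    Int × Int × Int × Int × PySem.Set (Int × Int) :=
  match st, ic with
  | (x, y, xr, yr, houses), (i, c) =>
    let m : Int × Int × Int × Int :=
      if c = '^' then (if PySem.Int.mod i 2 = 0 then (x, y + 1, xr, yr) else (x, y, xr, yr + 1))
      else if c = '>' then (if PySem.Int.mod i 2 = 0 then (x + 1, y, xr, yr) else (x, y, xr + 1, yr))
      else if c = '<' then (if PySem.Int.mod i 2 = 0 then (x - 1, y, xr, yr) else (x, y, xr - 1, yr))
      else if c = 'v' then (if PySem.Int.mod i 2 = 0 then (x, y - 1, xr, yr) else (x, y, xr, yr - 1))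
      else (x, y, xr, yr)
    match m with
    | (x, y, xr, yr) =>
      (x, y, xr, yr, PySem.Set.add (PySem.Set.add houses (x, y)) (xr, yr))

def count (string : String) : Int :=
  let fin := (PySem.List.enumerate string.toList 0).foldl pvAStep
    (0, 0, 0, 0, PySem.Set.ofList [((0 : Int), (0 : Int))])
  PySem.Set.len fin.2.2.2.2

-- ===== PORT B =====
-- Source B's _walk: simulate one mover from the origin, collecting every visited position
def pvWalkStep (st : Int × Int × PySem.Set (Int × Int)) (c : Char) :
    Int × Int × PySem.Set (Int × Int) :=
  match st with
  | (x, y, seen) =>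
    let p : Int × Int :=
      if c = '^' then (x, y + 1)
      else if c = 'v' then (x, y - 1)
      else if c = '>' then (x + 1, y)
      else if c = '<' then (x - 1, y)
      else (x, y)
    (p.1, p.2, PySem.Set.add seen p)

def pvWalk (s : List Char) : PySem.Set (Int × Int) :=
  (s.foldl pvWalkStep (0, 0, PySem.Set.ofList [((0 : Int), (0 : Int))])).2.2

def count_alt (string : String) : Int :=
  let cs := string.toList
  let santa := (PySem.List.slice? cs none none 2).getD []      -- string[::2]; step 2 ≠ 0, never none
  let robot := (PySem.List.slice? cs (some 1) none 2).getD []  -- string[1::2]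
  PySem.Set.len (PySem.Set.union (pvWalk santa) (pvWalk robot))

-- ===== PRECONDITION & SPEC =====
def Spec_count (string : String) (out : Int) : Prop := out = count_alt string
instance (string : String) (out : Int) : Decidable (Spec_count string out) := by unfold Spec_count; infer_instance

-- ===== CLAIM (what is proved, stated in full; the proofs are below) =====
def Claim_equal_count : Prop := ∀ (string : String), Dom_count string → Spec_count string (count string)

-- ===== LEMMAS AND PROOFS =====

-- one move of a single mover (Source B's if/elif chain)
def pvMove (p : Int × Int) (c : Char) : Int × Int :=
  if c = '^' then (p.1, p.2 + 1)
  else if c = 'v' then (p.1, p.2 - 1)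
  else if c = '>' then (p.1 + 1, p.2)
  else if c = '<' then (p.1 - 1, p.2)
  else p

-- all positions a mover starting at p visits along s (start included)
def pvVisited (p : Int × Int) (s : List Char) : List (Int × Int) := List.scanl pvMove p s

-- elements at even / odd indices
def pvEvens {α : Type} : List α → List α
  | [] => []
  | [a] => [a]
  | a :: _ :: t => a :: pvEvens t

def pvOdds {α : Type} : List α → List α
  | [] => []
  | _ :: t => pvEvens t

lemma pvEvens_cons {α : Type} (a : α) (t : List α) : pvEvens (a :: t) = a :: pvOdds t := by
  cases t <;> rfl

-- the positions A's loop adds to houses, in insertion order; E: the next char moves the first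
-- component (santa), O: the next char moves the second (robot); santa's position is added first
mutual
def pvInterE (p r : Int × Int) : List Char → List (Int × Int)
  | [] => []
  | c :: t => pvMove p c :: r :: pvInterO (pvMove p c) r t
def pvInterO (p r : Int × Int) : List Char → List (Int × Int)
  | [] => []
  | c :: t => p :: pvMove r c :: pvInterE p (pvMove r c) t
end

-- A's step = move the mover picked by parity, then add santa's and robot's positions
lemma pvAStep_eq (x y xr yr : Int) (h : PySem.Set (Int × Int)) (i : Int) (c : Char) :
    pvAStep (x, y, xr, yr, h) (i, c) =
      if PySem.Int.mod i 2 = 0 then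
        ((pvMove (x, y) c).1, (pvMove (x, y) c).2, xr, yr,
          PySem.Set.add (PySem.Set.add h (pvMove (x, y) c)) (xr, yr))
      else
        (x, y, (pvMove (xr, yr) c).1, (pvMove (xr, yr) c).2,
          PySem.Set.add (PySem.Set.add h (x, y)) (pvMove (xr, yr) c)) := by
  simp only [pvAStep, pvMove]
  split_ifs <;> simp_all

lemma pvParity (i : Int) : PySem.Int.mod (i + 1) 2 = 0 ↔ ¬ (PySem.Int.mod i 2 = 0) := by
  have h1 := PySem.Int.mod_eq_emod_of_pos (a := i) (b := 2) (by norm_num)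
  have h2 := PySem.Int.mod_eq_emod_of_pos (a := i + 1) (b := 2) (by norm_num)
  rw [h1, h2]; omega

-- A's whole loop: houses is the initial set updated with the interleaved position list
lemma pvA_fold (cs : List Char) : ∀ (i x y xr yr : Int) (h : PySem.Set (Int × Int)),
    ((PySem.List.enumerate cs i).foldl pvAStep (x, y, xr, yr, h)).2.2.2.2 =
      PySem.Set.update h (if PySem.Int.mod i 2 = 0 then pvInterE (x, y) (xr, yr) cs
                          else pvInterO (x, y) (xr, yr) cs) := by
  induction cs with
  | nil =>
    intro i x y xr yr h
    simp only [PySem.List.enumerate_nil, List.foldl_nil]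
    split <;> simp [pvInterE, pvInterO, PySem.Set.update_nil]
  | cons c t ih =>
    intro i x y xr yr h
    by_cases hi : PySem.Int.mod i 2 = 0
    · rw [PySem.List.enumerate_cons, List.foldl_cons, pvAStep_eq, if_pos hi, ih, if_pos hi]
      have hodd : ¬ PySem.Int.mod (i + 1) 2 = 0 := fun hh => (pvParity i).mp hh hi
      rw [if_neg hodd]
      simp only [pvInterE, PySem.Set.update_cons]
    · rw [PySem.List.enumerate_cons, List.foldl_cons, pvAStep_eq, if_neg hi, ih, if_neg hi]
      have heven : PySem.Int.mod (i + 1) 2 = 0 := (pvParity i).mpr hi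
      rw [if_pos heven]
      simp only [pvInterO, PySem.Set.update_cons]

-- B's walk: the seen set is the start set updated with the positions after the start
lemma pvWalk_fold (s : List Char) : ∀ (x y : Int) (h : PySem.Set (Int × Int)),
    (s.foldl pvWalkStep (x, y, h)).2.2 = PySem.Set.update h (pvVisited (x, y) s).tail := by
  induction s with
  | nil => intro x y h; simp [pvVisited, PySem.Set.update_nil]
  | cons c t ih =>
    intro x y h
    have hstep : pvWalkStep (x, y, h) c =
        ((pvMove (x, y) c).1, (pvMove (x, y) c).2, PySem.Set.add h (pvMove (x, y) c)) := by
      simp only [pvWalkStep, pvMove]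
    rw [List.foldl_cons, hstep, ih]
    have hv : pvVisited (x, y) (c :: t) = (x, y) :: pvVisited (pvMove (x, y) c) t := by
      simp [pvVisited, List.scanl_cons]
    rw [hv, List.tail_cons]
    cases t with
    | nil => simp [pvVisited, PySem.Set.update_nil, PySem.Set.update_cons]
    | cons d u =>
      rw [show pvVisited (pvMove (x, y) c) (d :: u)
            = pvMove (x, y) c :: pvVisited (pvMove (pvMove (x, y) c) d) u by
          simp [pvVisited, List.scanl_cons]]
      rw [PySem.Set.update_cons, List.tail_cons]

-- a visited list is its start followed by its tail
lemma pvVisited_head (p : Int × Int) (s : List Char) (q : Int × Int) :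
    q ∈ pvVisited p s ↔ q = p ∨ q ∈ (pvVisited p s).tail := by
  cases s <;> simp [pvVisited, List.scanl_cons]

-- membership in the interleaved list, modulo the two current positions
lemma pvInter_mem (cs : List Char) : ∀ (p r q : Int × Int),
    ((q ∈ pvInterE p r cs ∨ q = p ∨ q = r) ↔
      (q ∈ pvVisited p (pvEvens cs) ∨ q ∈ pvVisited r (pvOdds cs))) ∧
    ((q ∈ pvInterO p r cs ∨ q = p ∨ q = r) ↔
      (q ∈ pvVisited p (pvOdds cs) ∨ q ∈ pvVisited r (pvEvens cs))) := by
  induction cs with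
  | nil => intro p r q; simp [pvInterE, pvInterO, pvEvens, pvOdds, pvVisited]
  | cons c t ih =>
    intro p r q
    constructor
    · have ihO := (ih (pvMove p c) r q).2
      rw [pvEvens_cons, show pvOdds (c :: t) = pvEvens t from rfl]
      rw [show pvVisited p (c :: pvOdds t) = p :: pvVisited (pvMove p c) (pvOdds t) by
        simp [pvVisited, List.scanl_cons]]
      simp only [pvInterE, List.mem_cons]
      tauto
    · have ihE := (ih p (pvMove r c) q).1
      rw [pvEvens_cons, show pvOdds (c :: t) = pvEvens t from rfl]
      rw [show pvVisited r (c :: pvOdds t) = r :: pvVisited (pvMove r c) (pvOdds t) by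
        simp [pvVisited, List.scanl_cons]]
      simp only [pvInterO, List.mem_cons]
      tauto

-- string[::2] in canonical index form
lemma pvSliceEvenForm {α : Type} (xs : List α) :
    PySem.List.slice? xs none none 2 =
      some ((List.range ((xs.length + 1) / 2)).filterMap (fun k => xs[2 * k]?)) := by
  simp only [PySem.List.slice?, PySem.List.sliceIndices]
  norm_num
  have h1 : (if 0 < xs.length then (((xs.length : Int) + 2 - 1) / 2).toNat else 0)
      = (xs.length + 1) / 2 := by
    rcases Nat.eq_zero_or_pos xs.length with h | h
    · simp [h]
    · rw [if_pos h]
      have hcast : ((xs.length : Int) + 2 - 1) = ((xs.length + 1 : Nat) : Int) := by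
        push_cast; ring
      rw [hcast, show (2 : Int) = ((2 : Nat) : Int) from rfl, ← Int.natCast_ediv,
        Int.toNat_natCast]
  rw [h1]
  have h2 : ∀ k : Nat, ((2 * (k : Int)).toNat) = 2 * k := fun k => by omega
  simp only [h2]

-- the even-index selection equals pvEvens
lemma pvRangeEven {α : Type} (xs : List α) :
    (List.range ((xs.length + 1) / 2)).filterMap (fun k => xs[2 * k]?) = pvEvens xs := by
  induction xs using pvEvens.induct with
  | case1 => simp [pvEvens]
  | case2 a => simp [pvEvens]
  | case3 a b t ih =>
    have hlen : ((a :: b :: t).length + 1) / 2 = (t.length + 1) / 2 + 1 := by simp; omega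
    rw [hlen, List.range_succ_eq_map, List.filterMap_cons, List.filterMap_map]
    have hf : ((fun k => (a :: b :: t)[2 * k]?) ∘ Nat.succ) = (fun k => t[2 * k]?) := by
      funext k
      show (a :: b :: t)[2 * (k + 1)]? = t[2 * k]?
      rw [show 2 * (k + 1) = (2 * k + 1) + 1 by omega]
      simp
    rw [hf, ih]
    simp [pvEvens]

-- string[::2] is the even-indexed elements
lemma pvSlice_evens {α : Type} (xs : List α) :
    PySem.List.slice? xs none none 2 = some (pvEvens xs) := by
  rw [pvSliceEvenForm, pvRangeEven]

-- string[1::2] is the odd-indexed elements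
lemma pvSlice_odds {α : Type} (xs : List α) :
    PySem.List.slice? xs (some 1) none 2 = some (pvOdds xs) := by
  cases xs with
  | nil =>
    simp only [PySem.List.slice?, PySem.List.sliceIndices]
    norm_num
    rfl
  | cons a t =>
    simp only [PySem.List.slice?, PySem.List.sliceIndices]
    norm_num
    have h1 : (if 0 < t.length then (((t.length : Int) + 2 - 1) / 2).toNat else 0)
        = (t.length + 1) / 2 := by
      rcases Nat.eq_zero_or_pos t.length with h | h
      · simp [h]
      · rw [if_pos h]
        have hcast : ((t.length : Int) + 2 - 1) = ((t.length + 1 : Nat) : Int) := by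
          push_cast; ring
        rw [hcast, show (2 : Int) = ((2 : Nat) : Int) from rfl, ← Int.natCast_ediv,
          Int.toNat_natCast]
    rw [h1]
    have h2 : ∀ k : Nat, (a :: t)[(1 + 2 * (k : Int)).toNat]? = t[2 * k]? := fun k => by
      rw [show ((1 + 2 * (k : Int)).toNat) = 2 * k + 1 by omega]
      simp
    simp only [h2]
    rw [pvRangeEven]
    rfl

-- the two final sets agree in size
lemma pvAgree (cs : List Char) :
    PySem.Set.len (PySem.Set.update (PySem.Set.ofList [((0 : Int), (0 : Int))])
        (pvInterE (0, 0) (0, 0) cs)) =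
      PySem.Set.len (PySem.Set.union
        (PySem.Set.update (PySem.Set.ofList [((0 : Int), (0 : Int))])
          (pvVisited (0, 0) (pvEvens cs)).tail)
        (PySem.Set.update (PySem.Set.ofList [((0 : Int), (0 : Int))])
          (pvVisited (0, 0) (pvOdds cs)).tail)) := by
  have hnA : (PySem.Set.update (PySem.Set.ofList [((0 : Int), (0 : Int))])
      (pvInterE (0, 0) (0, 0) cs)).Nodup :=
    PySem.Set.nodup_update _ _ (PySem.Set.nodup_ofList _)
  have hnB : (PySem.Set.union
      (PySem.Set.update (PySem.Set.ofList [((0 : Int), (0 : Int))])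
        (pvVisited (0, 0) (pvEvens cs)).tail)
      (PySem.Set.update (PySem.Set.ofList [((0 : Int), (0 : Int))])
        (pvVisited (0, 0) (pvOdds cs)).tail)).Nodup :=
    PySem.Set.nodup_union _ _ (PySem.Set.nodup_update _ _ (PySem.Set.nodup_ofList _))
  have hperm : (PySem.Set.update (PySem.Set.ofList [((0 : Int), (0 : Int))])
      (pvInterE (0, 0) (0, 0) cs)).Perm
      (PySem.Set.union
        (PySem.Set.update (PySem.Set.ofList [((0 : Int), (0 : Int))])
          (pvVisited (0, 0) (pvEvens cs)).tail)
        (PySem.Set.update (PySem.Set.ofList [((0 : Int), (0 : Int))])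
          (pvVisited (0, 0) (pvOdds cs)).tail)) := by
    rw [List.perm_ext_iff_of_nodup hnA hnB]
    intro q
    have hmem := (pvInter_mem cs (0, 0) (0, 0) q).1
    rw [PySem.Set.mem_update, PySem.Set.mem_union, PySem.Set.mem_update,
      PySem.Set.mem_update]
    have hE := pvVisited_head (0, 0) (pvEvens cs) q
    have hO := pvVisited_head (0, 0) (pvOdds cs) q
    clear hnA hnB
    simp only [PySem.Set.mem_ofList, List.mem_cons, List.not_mem_nil, or_false] at *
    tauto
  simp only [PySem.Set.len, hperm.length_eq]

-- ===== VERDICT (by name: the statement is the Claim_ definition above) =====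
theorem count_spec : Claim_equal_count := by
  intro string _hdom
  simp only [Spec_count]
  have hA : count string =
      PySem.Set.len (PySem.Set.update (PySem.Set.ofList [((0 : Int), (0 : Int))])
        (pvInterE (0, 0) (0, 0) string.toList)) := by
    simp only [count]
    rw [pvA_fold string.toList 0 0 0 0 0 (PySem.Set.ofList [((0 : Int), (0 : Int))])]
    norm_num
  have hB : count_alt string =
      PySem.Set.len (PySem.Set.union
        (PySem.Set.update (PySem.Set.ofList [((0 : Int), (0 : Int))])
          (pvVisited (0, 0) (pvEvens string.toList)).tail)
        (PySem.Set.update (PySem.Set.ofList [((0 : Int), (0 : Int))])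
          (pvVisited (0, 0) (pvOdds string.toList)).tail)) := by
    simp only [count_alt, pvSlice_evens, pvSlice_odds, Option.getD_some, pvWalk]
    rw [pvWalk_fold, pvWalk_fold]
  rw [hA, hB, pvAgree]
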